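-- pv_equiv track=rewrite | github.com/tharunR-17/Unstop-Problems | Removal of String.py | remove_duplicates_and_reverse
-- ===== SOURCE A (Python) =====
-- def remove_duplicates_and_reverse(s):
--     result = []
--     seen = set()
--     for c in reversed(s):
--         if c not in seen:
--             result.append(c)
--             seen.add(c)
--     return ''.join(result)
-- ===== SOURCE B (Python) =====
-- def remove_duplicates_and_reverse(s):
--     last = {c: i for i, c in enumerate(s)}
--     return ''.join(sorted(last, key=lambda c: last[c], reverse=True))
-- ===== Notes on version B (the rewrite author's own statement) =====
-- stated objective: alternative
-- what changed: Replaces the reversed streaming pass with a membership set by building a last-occurrence index table in one forward pass and then sorting the distinct characters by that index in descending order.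
import Mathlib
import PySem

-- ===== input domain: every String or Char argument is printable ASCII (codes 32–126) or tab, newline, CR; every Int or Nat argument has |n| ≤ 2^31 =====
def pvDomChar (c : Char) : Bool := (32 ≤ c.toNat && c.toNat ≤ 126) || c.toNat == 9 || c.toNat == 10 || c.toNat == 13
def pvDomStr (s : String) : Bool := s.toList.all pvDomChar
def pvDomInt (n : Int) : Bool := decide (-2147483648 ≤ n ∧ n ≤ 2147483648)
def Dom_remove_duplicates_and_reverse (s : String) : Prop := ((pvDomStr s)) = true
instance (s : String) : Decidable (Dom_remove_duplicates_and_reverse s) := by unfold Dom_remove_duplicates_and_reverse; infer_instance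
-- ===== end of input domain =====

-- B replaces A's reversed streaming dedup pass with a last-occurrence index table
-- plus a descending sort of the distinct characters (alternative decomposition).

-- ===== PORT A =====
-- for c in reversed(s): if c not in seen: result.append(c); seen.add(c)
def remove_duplicates_and_reverse (s : String) : String :=
  let r := s.toList.reverse.foldl
    (fun (st : List Char × PySem.Set Char) c =>
      if st.2.contains c then st else (st.1 ++ [c], PySem.Set.add st.2 c))
    ([], PySem.Set.empty)
  String.mk r.1

-- ===== PORT B =====
-- last = {c: i for i, c in enumerate(s)}
def pvLastDict (s : String) : PySem.Dict Char Int :=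
  (PySem.List.enumerate s.toList 0).foldl (fun d p => d.insert p.2 p.1) PySem.Dict.empty

-- ''.join(sorted(last, key=lambda c: last[c], reverse=True)); iterating the dict yields
-- its keys, and last[c] always hits a key, so the lookup is ported as getD (default 0 unreached)
def remove_duplicates_and_reverse_alt (s : String) : String :=
  let last := pvLastDict s
  String.mk (PySem.List.sorted last.keys (fun c => last.getD c 0) true)

-- ===== PRECONDITION & SPEC =====
def Spec_remove_duplicates_and_reverse (s : String) (out : String) : Prop := out = remove_duplicates_and_reverse_alt s
instance (s : String) (out : String) : Decidable (Spec_remove_duplicates_and_reverse s out) := by unfold Spec_remove_duplicates_and_reverse; infer_instance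

-- ===== CLAIM (what is proved, stated in full; the proofs are below) =====
def Claim_equal_remove_duplicates_and_reverse : Prop := ∀ (s : String), Dom_remove_duplicates_and_reverse s → Spec_remove_duplicates_and_reverse s (remove_duplicates_and_reverse s)

-- ===== LEMMAS AND PROOFS =====

-- A's loop keeps result = seen, and both are the traversed prefix's Python set
theorem pvA_loop (xs : List Char) (t : PySem.Set Char) :
    xs.foldl (fun (st : List Char × PySem.Set Char) c =>
        if st.2.contains c then st else (st.1 ++ [c], PySem.Set.add st.2 c)) (t, t)
      = (PySem.Set.update t xs, PySem.Set.update t xs) := by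
  induction xs generalizing t with
  | nil => rfl
  | cons c xs ih =>
      simp only [List.foldl_cons]
      by_cases h : PySem.Set.contains t c = true
      · have ha : PySem.Set.add t c = t := by simp only [PySem.Set.add]; rw [if_pos h]
        rw [if_pos h]
        conv_rhs => rw [show PySem.Set.update t (c :: xs)
          = PySem.Set.update (PySem.Set.add t c) xs from rfl, ha]
        exact ih t
      · have ha : PySem.Set.add t c = t ++ [c] := by simp only [PySem.Set.add]; rw [if_neg h]
        rw [if_neg h, ← ha]
        conv_rhs => rw [show PySem.Set.update t (c :: xs)
          = PySem.Set.update (PySem.Set.add t c) xs from rfl]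
        exact ih (PySem.Set.add t c)

theorem pvA_eq_dedup (s : String) :
    remove_duplicates_and_reverse s = String.mk (PySem.List.dedup s.toList.reverse) := by
  unfold remove_duplicates_and_reverse
  change String.mk ((s.toList.reverse.foldl
    (fun (st : List Char × PySem.Set Char) c =>
      if st.2.contains c then st else (st.1 ++ [c], PySem.Set.add st.2 c))
    (PySem.Set.empty, PySem.Set.empty)).1) = _
  rw [pvA_loop]
  rfl

-- s.update(xs) appends the fresh elements of xs, in first-occurrence order
theorem pvSet_update_eq (xs : List Char) : ∀ (s : PySem.Set Char),
    PySem.Set.update s xs = s ++ (PySem.List.dedup xs).filter (fun x => !s.contains x) := by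
  induction xs with
  | nil => intro s; simp [PySem.Set.update, PySem.List.dedup, PySem.Set.ofList]
  | cons x xs ih =>
      intro s
      have hded : PySem.List.dedup (x :: xs)
          = x :: (PySem.List.dedup xs).filter (fun y => !PySem.Set.contains [x] y) := by
        have h1 : PySem.List.dedup (x :: xs) = PySem.Set.update [x] xs := by
          simp [PySem.List.dedup, PySem.Set.ofList_eq_foldl, PySem.Set.update, PySem.Set.add,
            PySem.Set.contains]
        rw [h1, ih [x]]
        rfl
      have hstep : PySem.Set.update s (x :: xs) = PySem.Set.update (PySem.Set.add s x) xs := rfl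
      rw [hstep, ih (PySem.Set.add s x), hded]
      by_cases hc : s.contains x = true
      · simp only [PySem.Set.add, hc, if_true, List.filter_cons]
        simp only [PySem.Set.contains] at hc ⊢
        simp [List.filter_filter]
        apply List.filter_congr
        intro y hy
        by_cases hyx : (y == x) = true
        · have : y = x := eq_of_beq hyx
          subst this; simpa using hc
        · simp at hyx; simp [hyx]
      · simp only [PySem.Set.add, hc, List.filter_cons]
        simp only [PySem.Set.contains] at hc ⊢
        simp [List.filter_filter, List.append_assoc]

-- dedup pulls a head out front and drops its later duplicates
theorem pvDedup_cons (c : Char) (xs : List Char) :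
    PySem.List.dedup (c :: xs) = c :: (PySem.List.dedup xs).filter (fun x => x ≠ c) := by
  have h1 : PySem.List.dedup (c :: xs) = PySem.Set.update [c] xs := by
    simp [PySem.List.dedup, PySem.Set.ofList_eq_foldl, PySem.Set.update, PySem.Set.add,
      PySem.Set.contains]
  rw [h1, pvSet_update_eq xs [c]]
  simp only [List.singleton_append, List.cons.injEq, true_and]
  apply List.filter_congr
  intro y _
  simp [PySem.Set.contains, eq_comm]

-- the last-index dict over any enumeration start
def pvDictFrom (xs : List Char) (k : Int) : PySem.Dict Char Int :=
  (PySem.List.enumerate xs k).foldl (fun d p => d.insert p.2 p.1) PySem.Dict.empty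

theorem pvDict_snoc (xs : List Char) (c : Char) (k : Int) :
    pvDictFrom (xs ++ [c]) k = (pvDictFrom xs k).insert c (k + xs.length) := by
  unfold pvDictFrom
  rw [PySem.List.enumerate_append, List.foldl_append]
  rfl

-- keys of the dict are the distinct characters, first occurrences in order
theorem pvDict_keys (xs : List Char) (k : Int) :
    (pvDictFrom xs k).keys = PySem.List.dedup xs := by
  unfold pvDictFrom
  rw [PySem.Dict.keys_foldl_insert_key (key := fun p : Int × Char => p.2)]
  simp [PySem.List.map_snd_enumerate, PySem.Set.update, PySem.Set.ofList_eq_foldl]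

-- every stored value is in [k, k + |xs|)
theorem pvDict_getD_lt (xs : List Char) (k : Int) (x : Char) (hx : x ∈ xs) :
    k ≤ (pvDictFrom xs k).getD x 0 ∧ (pvDictFrom xs k).getD x 0 < k + xs.length := by
  induction xs using List.reverseRecOn with
  | nil => simp at hx
  | append_singleton ys c ih =>
      rw [pvDict_snoc, PySem.Dict.getD_insert]
      by_cases h : x = c
      · simp [h]
      · simp only [if_neg h]
        have hx' : x ∈ ys := by
          rcases List.mem_append.mp hx with h' | h'
          · exact h'
          · simp at h'; exact absurd h' h
        have := ih hx'
        simp only [List.length_append, List.length_cons, List.length_nil]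
        push_cast
        omega

-- the dedup of the reverse is strictly descending in the stored last index
theorem pvDict_pairwise (xs : List Char) (k : Int) :
    (PySem.List.dedup xs.reverse).Pairwise
      (fun a b => (pvDictFrom xs k).getD b 0 < (pvDictFrom xs k).getD a 0) := by
  induction xs using List.reverseRecOn with
  | nil => simp [PySem.List.dedup, PySem.Set.ofList]
  | append_singleton ys c ih =>
      rw [pvDict_snoc]
      have hrev : (ys ++ [c]).reverse = c :: ys.reverse := by simp
      rw [hrev, pvDedup_cons]
      constructor
      · intro b hb
        have hb' := List.mem_of_mem_filter hb
        have hbne : b ≠ c := by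
          have := List.of_mem_filter hb; simpa using this
        have hbys : b ∈ ys := by
          have : b ∈ ys.reverse := (PySem.List.mem_dedup _ _).mp hb'
          simpa using this
        rw [PySem.Dict.getD_insert, PySem.Dict.getD_insert, if_neg hbne, if_pos rfl]
        exact (pvDict_getD_lt ys k b hbys).2
      · have hpf : ((PySem.List.dedup ys.reverse).filter (fun x => x ≠ c)).Pairwise
            (fun a b => (pvDictFrom ys k).getD b 0 < (pvDictFrom ys k).getD a 0) :=
          ih.filter _
        refine hpf.imp_of_mem ?_
        intro a b ha hb hab
        have hane : a ≠ c := by have := List.of_mem_filter ha; simpa using this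
        have hbne : b ≠ c := by have := List.of_mem_filter hb; simpa using this
        rw [PySem.Dict.getD_insert, PySem.Dict.getD_insert, if_neg hane, if_neg hbne]
        exact hab

theorem pvB_eq_dedup (s : String) :
    remove_duplicates_and_reverse_alt s = String.mk (PySem.List.dedup s.toList.reverse) := by
  unfold remove_duplicates_and_reverse_alt
  have hd : pvLastDict s = pvDictFrom s.toList 0 := rfl
  apply congrArg String.mk
  rw [hd]
  apply PySem.List.sorted_rev_eq_of_perm_of_pairwise_gt
  · rw [pvDict_keys]
    rw [List.perm_ext_iff_of_nodup (PySem.List.nodup_dedup _) (PySem.List.nodup_dedup _)]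
    intro a
    simp
  · exact pvDict_pairwise s.toList 0

-- ===== VERDICT (by name: the statement is the Claim_ definition above) =====
theorem remove_duplicates_and_reverse_spec : Claim_equal_remove_duplicates_and_reverse := by
  intro s _
  unfold Spec_remove_duplicates_and_reverse
  rw [pvA_eq_dedup, pvB_eq_dedup]
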